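-- pv_equiv track=rewrite | github.com/shanesatterfield/hacker-rank | Python/Mathematics/Number_Theory/Eulers_Criterion/python_eulers_criterion/__main__.py | eulers_criterion
-- ===== SOURCE A (Python) =====
-- def eulers_criterion(A, M):
--     if A == 0:
--         return True
--
--     exponent = (M-1)//2
--     result   = 1
--     base     = A % M
--
--     while exponent > 0:
--         if exponent % 2 == 1:
--             result = (result * base) % M
--         exponent = exponent >> 1
--         base = (base * base) % M
--
--     # Final modulated answer.
--     return result % M == 1
-- ===== SOURCE B (Python) =====
-- def eulers_criterion(A, M):
--     if A == 0:
--         return True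
--
--     def modpow(base, exp):
--         # empty product for a non-positive exponent
--         if exp <= 0:
--             return 1
--         half = modpow(base, exp // 2)
--         sq = (half * half) % M
--         return sq if exp % 2 == 0 else (sq * base) % M
--
--     return modpow(A % M, (M - 1) // 2) % M == 1
-- ===== Notes on version B (the rewrite author's own statement) =====
-- stated objective: alternative
-- what changed: Replaces A's iterative bit-scan square-and-multiply loop (mutating exponent/result/base) by a recursive divide-and-conquer modpow helper that recurses on exp // 2 and squares the recursive result.
import Mathlib
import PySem

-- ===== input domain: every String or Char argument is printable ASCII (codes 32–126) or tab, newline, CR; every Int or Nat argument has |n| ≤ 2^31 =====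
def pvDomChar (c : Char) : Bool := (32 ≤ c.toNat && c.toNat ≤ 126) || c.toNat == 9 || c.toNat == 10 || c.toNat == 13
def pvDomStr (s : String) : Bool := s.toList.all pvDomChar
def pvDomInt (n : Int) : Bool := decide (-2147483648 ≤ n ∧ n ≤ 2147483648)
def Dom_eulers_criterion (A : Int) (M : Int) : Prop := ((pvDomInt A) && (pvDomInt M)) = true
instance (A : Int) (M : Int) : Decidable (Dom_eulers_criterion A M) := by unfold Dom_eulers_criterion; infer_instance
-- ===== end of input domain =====

-- B replaces A's iterative bit-scan square-and-multiply loop by a recursive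
-- divide-and-conquer modpow on the halved exponent (alternative decomposition, same cost).


-- ===== PORT A =====
-- the while loop of A: state (exponent, result, base); `exponent >> 1` is `>>> 1` on Int
def eulersLoopA (M exponent result base : Int) : Int :=
  if 0 < exponent then
    eulersLoopA M (exponent >>> (1:Nat))
      (if PySem.Int.mod exponent 2 = 1 then PySem.Int.mod (result * base) M else result)
      (PySem.Int.mod (base * base) M)
  else result
termination_by exponent.toNat
decreasing_by
  have h2 : exponent >>> (1:Nat) = exponent / 2 := by simp [Int.shiftRight_eq_div_pow]
  rw [h2]; omega

def eulers_criterion (A : Int) (M : Int) : Bool :=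
  if A = 0 then true
  else
    decide (PySem.Int.mod
      (eulersLoopA M (PySem.Int.floordiv (M - 1) 2) 1 (PySem.Int.mod A M)) M = 1)

-- ===== PORT B =====
-- recursive square-and-multiply: modpow base exp mod M, recursing on exp // 2
def modpowB (M base exp : Int) : Int :=
  if exp ≤ 0 then 1
  else
    let half := modpowB M base (PySem.Int.floordiv exp 2)
    let sq := PySem.Int.mod (half * half) M
    if PySem.Int.mod exp 2 = 0 then sq else PySem.Int.mod (sq * base) M
termination_by exp.toNat
decreasing_by
  rw [PySem.Int.floordiv_eq_ediv_of_pos (by norm_num)]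
  omega

def eulers_criterion_alt (A : Int) (M : Int) : Bool :=
  if A = 0 then true
  else
    decide (PySem.Int.mod
      (modpowB M (PySem.Int.mod A M) (PySem.Int.floordiv (M - 1) 2)) M = 1)

-- ===== PRECONDITION & SPEC =====
-- Pre_ excludes M = 0 with A ≠ 0, where Python's `A % M` raises ZeroDivisionError in both programs.
def Pre_eulers_criterion (A : Int) (M : Int) : Prop := A = 0 ∨ M ≠ 0
instance (A : Int) (M : Int) : Decidable (Pre_eulers_criterion A M) := by
  unfold Pre_eulers_criterion; infer_instance

def pvWitness_eulers_criterion : Int × Int := (3, 7)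

def Spec_eulers_criterion (A : Int) (M : Int) (out : Bool) : Prop := out = eulers_criterion_alt A M
instance (A : Int) (M : Int) (out : Bool) : Decidable (Spec_eulers_criterion A M out) := by
  unfold Spec_eulers_criterion; infer_instance

-- ===== CLAIM (what is proved, stated in full; the proofs are below) =====
def Claim_equal_eulers_criterion : Prop :=
  ∀ (A : Int) (M : Int), Dom_eulers_criterion A M → Pre_eulers_criterion A M →
    Spec_eulers_criterion A M (eulers_criterion A M)

-- ===== LEMMAS AND PROOFS =====

-- Python `x % M` is congruent to x modulo M
theorem pymod_modEq (x M : Int) : PySem.Int.mod x M ≡ x [ZMOD M] := by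
  rw [Int.modEq_iff_dvd]
  exact ⟨PySem.Int.floordiv x M, by
    have h := PySem.Int.floordiv_mul_add_mod x M
    have h2 := mul_comm M (PySem.Int.floordiv x M)
    linarith⟩

-- congruent values have the same Python remainder (M ≠ 0)
theorem pymod_eq_of_modEq {x y M : Int} (hM : M ≠ 0) (h : x ≡ y [ZMOD M]) :
    PySem.Int.mod x M = PySem.Int.mod y M := by
  have hc : PySem.Int.mod x M ≡ PySem.Int.mod y M [ZMOD M] :=
    ((pymod_modEq x M).trans h).trans (pymod_modEq y M).symm
  have hd : M ∣ PySem.Int.mod y M - PySem.Int.mod x M := (Int.modEq_iff_dvd).mp hc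
  obtain ⟨k, hk⟩ := hd
  rcases lt_or_gt_of_ne hM with hneg | hpos
  · obtain ⟨h1x, h2x⟩ := PySem.Int.mod_neg_bounds (a := x) hneg
    obtain ⟨h1y, h2y⟩ := PySem.Int.mod_neg_bounds (a := y) hneg
    have hk0 : k = 0 := by nlinarith
    rw [hk0, mul_zero] at hk; omega
  · have h1x := PySem.Int.mod_nonneg (a := x) hpos
    have h2x := PySem.Int.mod_lt (a := x) hpos
    have h1y := PySem.Int.mod_nonneg (a := y) hpos
    have h2y := PySem.Int.mod_lt (a := y) hpos
    have hk0 : k = 0 := by nlinarith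
    rw [hk0, mul_zero] at hk; omega

-- A's loop computes result * base ^ exponent, modulo M
theorem eulersLoopA_congr (M : Int) (n : Nat) :
    ∀ e r b : Int, e.toNat = n → eulersLoopA M e r b ≡ r * b ^ n [ZMOD M] := by
  induction n using Nat.strong_induction_on with
  | _ n ih =>
    intro e r b hn
    rw [eulersLoopA.eq_def]
    split
    · rename_i hpos
      have he2 : e >>> (1 : Nat) = e / 2 := by
        simp [Int.shiftRight_eq_div_pow]
      have hhalf : (e >>> (1 : Nat)).toNat = n / 2 := by rw [he2]; omega
      have hmod2 : PySem.Int.mod e 2 = e % 2 :=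
        PySem.Int.mod_eq_emod_of_pos (by norm_num)
      have hrec := fun (r' b' : Int) => ih (n / 2) (by omega) (e >>> (1 : Nat)) r' b' hhalf
      refine (hrec _ _).trans ?_
      have hb : PySem.Int.mod (b * b) M ≡ b * b [ZMOD M] := pymod_modEq _ M
      have hbpow : (PySem.Int.mod (b * b) M) ^ (n / 2) ≡ (b * b) ^ (n / 2) [ZMOD M] :=
        hb.pow _
      by_cases hpar : PySem.Int.mod e 2 = 1
      · have hodd : n % 2 = 1 := by rw [hmod2] at hpar; omega
        simp only [if_pos hpar]
        calc PySem.Int.mod (r * b) M * (PySem.Int.mod (b * b) M) ^ (n / 2)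
            ≡ (r * b) * (b * b) ^ (n / 2) [ZMOD M] := (pymod_modEq _ M).mul hbpow
          _ = r * b ^ n := by
              have hexp : b ^ n = b ^ (n / 2 * 2) * b := by
                rw [← pow_succ]; congr 1; omega
              rw [← pow_two, ← pow_mul, hexp]
              ring
      · have heven : n % 2 = 0 := by rw [hmod2] at hpar; omega
        simp only [if_neg hpar]
        calc r * (PySem.Int.mod (b * b) M) ^ (n / 2)
            ≡ r * (b * b) ^ (n / 2) [ZMOD M] := Int.ModEq.mul_left r hbpow
          _ = r * b ^ n := by
              rw [← pow_two, ← pow_mul]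
              congr 2
              omega
    · rename_i hle
      have : n = 0 := by omega
      simp [this]

-- B's modpow computes base ^ exp, modulo M
theorem modpowB_congr (M b : Int) (n : Nat) :
    ∀ e : Int, e.toNat = n → modpowB M b e ≡ b ^ n [ZMOD M] := by
  induction n using Nat.strong_induction_on with
  | _ n ih =>
    intro e hn
    rw [modpowB.eq_def]
    split
    · rename_i hle
      have : n = 0 := by omega
      simp [this]
    · rename_i hgt
      have hpos : 0 < e := by omega
      have hfd : PySem.Int.floordiv e 2 = e / 2 :=
        PySem.Int.floordiv_eq_ediv_of_pos (by norm_num)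
      have hhalf : (PySem.Int.floordiv e 2).toNat = n / 2 := by rw [hfd]; omega
      have hmod2 : PySem.Int.mod e 2 = e % 2 :=
        PySem.Int.mod_eq_emod_of_pos (by norm_num)
      have hrec := ih (n / 2) (by omega) _ hhalf
      have hsq : PySem.Int.mod (modpowB M b (PySem.Int.floordiv e 2) *
          modpowB M b (PySem.Int.floordiv e 2)) M ≡ b ^ (n / 2) * b ^ (n / 2) [ZMOD M] :=
        (pymod_modEq _ M).trans (hrec.mul hrec)
      by_cases hpar : PySem.Int.mod e 2 = 0
      · have heven : n % 2 = 0 := by rw [hmod2] at hpar; omega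
        simp only [if_pos hpar]
        refine hsq.trans ?_
        rw [← pow_add]
        have : n / 2 + n / 2 = n := by omega
        rw [this]
      · have hodd : n % 2 = 1 := by rw [hmod2] at hpar; omega
        simp only [if_neg hpar]
        calc PySem.Int.mod (PySem.Int.mod (modpowB M b (PySem.Int.floordiv e 2) *
                modpowB M b (PySem.Int.floordiv e 2)) M * b) M
            ≡ b ^ (n / 2) * b ^ (n / 2) * b [ZMOD M] :=
              (pymod_modEq _ M).trans (hsq.mul_right b)
          _ = b ^ n := by
              rw [← pow_add, ← pow_succ]
              congr 1
              omega

-- ===== VERDICT (by name: the statement is the Claim_ definition above) =====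
theorem eulers_criterion_spec : Claim_equal_eulers_criterion := by
  intro A M _ hpre
  unfold Spec_eulers_criterion eulers_criterion eulers_criterion_alt
  by_cases hA : A = 0
  · simp [hA]
  · have hM : M ≠ 0 := hpre.resolve_left hA
    simp only [if_neg hA]
    have hA' := eulersLoopA_congr M (PySem.Int.floordiv (M - 1) 2).toNat
      (PySem.Int.floordiv (M - 1) 2) 1 (PySem.Int.mod A M) rfl
    have hB' := modpowB_congr M (PySem.Int.mod A M) (PySem.Int.floordiv (M - 1) 2).toNat
      (PySem.Int.floordiv (M - 1) 2) rfl
    rw [one_mul] at hA'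
    rw [pymod_eq_of_modEq hM (hA'.trans hB'.symm)]
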